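-- pv_equiv track=rewrite | github.com/wibaek/PS | programmers/코딩테스트 연습/힙(Heap)/더 맵게.py | solution
-- ===== SOURCE A (Python) =====
-- from heapq import heappush, heappop, heapify
--
-- def solution(sco, K):
--     heapify(sco)
--     answer = 0
--
--     while True:
--         a = heappop(sco)
--         if a >= K:
--             return answer
--         if len(sco) == 0:
--             return -1
--         b = heappop(sco)
--
--         heappush(sco, a + b * 2)
--         answer += 1
-- ===== SOURCE B (Python) =====
-- from collections import deque
--
--
-- def solution(sco, K):
--     # Two-queue monotone trick: sort once, then keep newly created mixes in a
--     # FIFO queue.  Mixes are produced in nondecreasing order, so the overall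
--     # minimum is always the smaller of the two queue fronts -- each extraction
--     # is O(1), no heap and no re-insertion into an ordered structure.
--     base = sorted(sco)
--     new = deque()
--     i = 0
--     answer = 0
--
--     def pop():
--         nonlocal i
--         if i < len(base) and (not new or base[i] <= new[0]):
--             v = base[i]
--             i += 1
--             return v
--         return new.popleft()
--
--     while True:
--         a = pop()
--         if a >= K:
--             return answer
--         if i == len(base) and not new:
--             return -1
--         b = pop()
--         new.append(a + 2 * b)
--         answer += 1
-- ===== Notes on version B (the rewrite author's own statement) =====
-- stated objective: faster
-- what changed: Replaces the heap with the two-queue monotone trick: sort once, keep newly created mixes in a FIFO queue (they come out in nondecreasing order), and take each minimum as the smaller of the two queue fronts in O(1) instead of heap push/pop.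
-- outside the precondition, e.g. on solution([], 7): A raises IndexError, B raises IndexError
import Mathlib
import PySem

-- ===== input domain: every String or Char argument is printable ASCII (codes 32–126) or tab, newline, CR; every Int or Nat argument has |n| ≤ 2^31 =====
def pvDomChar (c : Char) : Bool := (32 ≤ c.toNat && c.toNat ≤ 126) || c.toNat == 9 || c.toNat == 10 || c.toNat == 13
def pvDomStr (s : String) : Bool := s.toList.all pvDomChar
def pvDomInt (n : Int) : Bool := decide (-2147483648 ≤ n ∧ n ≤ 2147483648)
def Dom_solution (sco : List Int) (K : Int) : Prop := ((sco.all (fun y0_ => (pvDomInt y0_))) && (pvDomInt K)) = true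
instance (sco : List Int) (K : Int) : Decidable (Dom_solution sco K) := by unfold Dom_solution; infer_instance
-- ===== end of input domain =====

-- B replaces A's binary heap by the two-queue monotone trick (sort once + FIFO queue of mixes,
-- O(1) extraction); equivalence is about the RETURN value only: A heap-reorders sco in place, B does not mutate it.


-- ===== PORT A =====
-- heapq has no PySem primitive; it is ported by hand THROUGH ITS CONTRACT on a multiset of
-- Ints: heappop removes and returns the minimum element (exact for Int values: ties are equal
-- values, so the returned value and the remaining multiset coincide with CPython's), heappush
-- adds an element (its position inside the heap is irrelevant under this contract), heapify is
-- the identity on the carried multiset.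
def pvHeapPop (l : List Int) : Option (Int × List Int) :=
  match PySem.List.min? l (fun x => x) with
  | none => none                      -- heappop from an empty heap: IndexError (excluded by Pre_)
  | some m => some (m, l.erase m)

-- A's while-loop; fuel = initial length (each iteration removes a net one element)
def pvLoopA (K : Int) : Nat → List Int → Int → Int
  | 0, _, _ => -1                     -- fuel guard, never reached from a nonempty start
  | fuel + 1, l, acc =>
    match pvHeapPop l with
    | none => -1                      -- a = heappop(sco) on empty: IndexError (excluded by Pre_)
    | some (a, rest) =>
      if a ≥ K then acc
      else if rest = [] then -1
      else
        match pvHeapPop rest with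
        | none => -1                  -- unreachable: rest ≠ []
        | some (b, rest2) => pvLoopA K fuel ((a + b * 2) :: rest2) (acc + 1)

def solution (sco : List Int) (K : Int) : Int :=
  pvLoopA K sco.length sco 0

-- ===== PORT B =====
-- B's pop(): the smaller of the two queue fronts (ties prefer base: 'base[i] <= new[0]');
-- returns the popped value and the two remaining queues; none = popleft of an empty pool
-- (IndexError, excluded by Pre_).
def pvPop (base q : List Int) : Option (Int × List Int × List Int) :=
  match base, q with
  | [], [] => none
  | [], y :: q' => some (y, [], q')
  | x :: b', [] => some (x, b', [])
  | x :: b', y :: q' => if x ≤ y then some (x, b', y :: q') else some (y, x :: b', q')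

-- B's while-loop over (remaining sorted base, FIFO queue of mixes); fuel = initial length
def pvLoopB (K : Int) : Nat → List Int → List Int → Int → Int
  | 0, _, _, _ => -1                  -- fuel guard, never reached from a nonempty start
  | fuel + 1, base, q, acc =>
    match pvPop base q with
    | none => -1                      -- pop() on empty pool: IndexError (excluded by Pre_)
    | some (a, base', q') =>
      if a ≥ K then acc
      else if base' = [] ∧ q' = [] then -1
      else
        match pvPop base' q' with
        | none => -1                  -- unreachable: pool nonempty
        | some (b, base2, q2) => pvLoopB K fuel base2 (q2 ++ [a + 2 * b]) (acc + 1)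

def solution_alt (sco : List Int) (K : Int) : Int :=
  pvLoopB K sco.length (PySem.List.sorted sco (fun x => x)) [] 0

-- ===== PRECONDITION & SPEC =====
-- Pre_ excludes only the empty list, on which both Pythons raise IndexError at the first pop.
def Pre_solution (sco : List Int) (K : Int) : Prop := sco ≠ []
instance (sco : List Int) (K : Int) : Decidable (Pre_solution sco K) := by unfold Pre_solution; infer_instance
def pvWitness_solution : List Int × Int := ([1, 2, 9], 10)

def Spec_solution (sco : List Int) (K : Int) (out : Int) : Prop := out = solution_alt sco K
instance (sco : List Int) (K : Int) (out : Int) : Decidable (Spec_solution sco K out) := by unfold Spec_solution; infer_instance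

-- ===== CLAIM (what is proved, stated in full; the proofs are below) =====
def Claim_equal_solution : Prop := ∀ (sco : List Int) (K : Int), Dom_solution sco K → Pre_solution sco K → Spec_solution sco K (solution sco K)

-- ===== LEMMAS AND PROOFS =====

-- every element of a ≤-sorted nonempty list is ≤ its last element
theorem pv_le_getLast (l : List Int) (hl : l.Pairwise (· ≤ ·)) (h : l ≠ []) :
    ∀ z ∈ l, z ≤ l.getLast h :=
  match l, hl, h with
  | [x], _, _ => by intro z hz; simp at hz ⊢; omega
  | x :: y :: t, hl, _ => by
    intro z hz
    rw [List.getLast_cons (by simp : y :: t ≠ [])]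
    rcases List.mem_cons.mp hz with rfl | hz'
    · exact le_trans (List.rel_of_pairwise_cons hl List.mem_cons_self)
        (pv_le_getLast (y :: t) hl.of_cons (by simp) y List.mem_cons_self)
    · exact pv_le_getLast (y :: t) hl.of_cons (by simp) z hz'

-- pvPop on sorted queues returns a minimum of the pool; the rest is the pool minus it,
-- and exactly one of the two queues lost its head
theorem pv_pop_spec (base q : List Int) (hb : base.Pairwise (· ≤ ·)) (hq : q.Pairwise (· ≤ ·))
    (hne : ¬ (base = [] ∧ q = [])) :
    ∃ a base' q', pvPop base q = some (a, base', q') ∧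
      a ∈ base ++ q ∧ (∀ w ∈ base ++ q, a ≤ w) ∧
      (base' ++ q').Perm ((base ++ q).erase a) ∧
      base'.Pairwise (· ≤ ·) ∧ q'.Pairwise (· ≤ ·) ∧
      ((base = a :: base' ∧ q' = q) ∨ (q = a :: q' ∧ base' = base)) := by
  match base, q with
  | [], [] => exact absurd ⟨rfl, rfl⟩ hne
  | [], y :: q' =>
    refine ⟨y, [], q', rfl, by simp, ?_, by simp, by simp, hq.of_cons, Or.inr ⟨rfl, rfl⟩⟩
    intro w hw
    simp at hw
    rcases hw with rfl | hw'
    · exact le_refl _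
    · exact List.rel_of_pairwise_cons hq hw'
  | x :: b', [] =>
    refine ⟨x, b', [], rfl, by simp, ?_, by simp, hb.of_cons, by simp, Or.inl ⟨rfl, rfl⟩⟩
    intro w hw
    simp at hw
    rcases hw with rfl | hw'
    · exact le_refl _
    · exact List.rel_of_pairwise_cons hb hw'
  | x :: b', y :: q' =>
    by_cases hxy : x ≤ y
    · refine ⟨x, b', y :: q', by simp [pvPop, hxy], by simp, ?_, by simp, hb.of_cons, hq, Or.inl ⟨rfl, rfl⟩⟩
      intro w hw
      simp at hw
      rcases hw with rfl | hw' | rfl | hw'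
      · exact le_refl _
      · exact List.rel_of_pairwise_cons hb hw'
      · exact hxy
      · exact le_trans hxy (List.rel_of_pairwise_cons hq hw')
    · have hyx : y ≤ x := le_of_not_ge hxy
      have hymin : ∀ w ∈ x :: b' ++ (y :: q'), y ≤ w := by
        intro w hw
        simp at hw
        rcases hw with rfl | hw' | rfl | hw'
        · exact hyx
        · exact le_trans hyx (List.rel_of_pairwise_cons hb hw')
        · exact le_refl _
        · exact List.rel_of_pairwise_cons hq hw'
      refine ⟨y, x :: b', q', by simp [pvPop, hxy], by simp, hymin, ?_, hb, hq.of_cons, Or.inr ⟨rfl, rfl⟩⟩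
      have hynotb : y ∉ x :: b' := by
        intro hy
        rcases List.mem_cons.mp hy with rfl | hy'
        · exact hxy (le_refl _)
        · exact hxy (List.rel_of_pairwise_cons hb hy')
      rw [List.erase_append_right _ hynotb]
      simp

-- pvHeapPop pops the same VALUE as any minimum witness
theorem pv_heap_pop_eq (l : List Int) (a : Int) (ha : a ∈ l) (hmin : ∀ w ∈ l, a ≤ w) :
    pvHeapPop l = some (a, l.erase a) := by
  unfold pvHeapPop
  cases hm : PySem.List.min? l (fun x => x) with
  | none =>
    exact absurd ((PySem.List.min?_eq_none_iff l (fun x => x)).mp hm ▸ ha) (List.not_mem_nil)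
  | some m =>
    have h1 := PySem.List.min?_isMin hm a ha
    have h2 := hmin m (PySem.List.min?_mem hm)
    simp at h1
    have : m = a := le_antisymm h1 h2
    subst this
    rfl

-- the queue invariant: the latest mix q.getLast was built from a0 ≤ b0 with b0 below
-- everything else still in the pool
def pvQCert (base q : List Int) : Prop :=
  ∀ h : q ≠ [], ∃ a0 b0 : Int, q.getLast h = a0 + 2 * b0 ∧ a0 ≤ b0 ∧
    ∀ w ∈ base ++ q.dropLast, b0 ≤ w

-- the two loops agree step by step: A's heap multiset stays a permutation of B's base ++ queue
theorem pv_loop_eq (K : Int) :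
    ∀ (fuel : Nat) (l base q : List Int) (acc : Int),
      (base ++ q).Perm l → base.Pairwise (· ≤ ·) → q.Pairwise (· ≤ ·) → pvQCert base q →
      pvLoopA K fuel l acc = pvLoopB K fuel base q acc := by
  intro fuel
  induction fuel with
  | zero => intro l base q acc _ _ _ _; rfl
  | succ fuel ih =>
    intro l base q acc hperm hb hq hcert
    by_cases hemp : base = [] ∧ q = []
    · obtain ⟨rfl, rfl⟩ := hemp
      have hl : l = [] := by simpa [List.perm_nil] using hperm.symm
      subst hl
      simp [pvLoopA, pvLoopB, pvHeapPop, pvPop, PySem.List.min?]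
    · obtain ⟨a, base', q', hpop, hmem, hmin, hperm', hb', hq', hcase⟩ := pv_pop_spec base q hb hq hemp
      have haL : a ∈ l := hperm.mem_iff.mp hmem
      have hminL : ∀ w ∈ l, a ≤ w := fun w hw => hmin w (hperm.mem_iff.mpr hw)
      have hA := pv_heap_pop_eq l a haL hminL
      rw [pvLoopA.eq_def, pvLoopB.eq_def]
      simp only [hA, hpop]
      by_cases hK : a ≥ K
      · simp [hK]
      · simp only [hK, if_false]
        have hperm2 : (base' ++ q').Perm (l.erase a) := hperm'.trans (hperm.erase a)
        by_cases hrest : base' = [] ∧ q' = []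
        · obtain ⟨rfl, rfl⟩ := hrest
          have : l.erase a = [] := by simpa [List.perm_nil] using hperm2.symm
          simp [this]
        · have hrestA : l.erase a ≠ [] := by
            intro h
            rw [h, List.perm_nil, List.append_eq_nil_iff] at hperm2
            exact hrest hperm2
          obtain ⟨b, base2, q2, hpop2, hmem2, hmin2, hperm2', hb2, hq2, hcase2⟩ :=
            pv_pop_spec base' q' hb' hq' hrest
          have hbL : b ∈ l.erase a := hperm2.mem_iff.mp hmem2
          have hminL2 : ∀ w ∈ l.erase a, b ≤ w := fun w hw => hmin2 w (hperm2.mem_iff.mpr hw)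
          have hA2 := pv_heap_pop_eq (l.erase a) b hbL hminL2
          simp only [hrestA, if_false, if_neg hrest, hA2, hpop2]
          -- a ≤ b: b is still in the pool a was minimal over
          have hbPool : b ∈ base ++ q := List.mem_of_mem_erase (hperm'.mem_iff.mp hmem2)
          have hab : a ≤ b := hmin b hbPool
          -- every element of the new queue is ≤ the pushed mix a + 2*b
          have hpushle : ∀ z ∈ q2, z ≤ a + 2 * b := by
            intro z hz
            by_cases hq2e : q2 = []
            · rw [hq2e] at hz; exact absurd hz (List.not_mem_nil)
            · -- q2 is a nonempty tail-suffix of q, so q ≠ [] and they share getLast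
              have hq'ne : q' ≠ [] := by
                rcases hcase2 with ⟨_, rfl⟩ | ⟨rfl, _⟩
                · exact hq2e
                · simp
              have hqne : q ≠ [] := by
                rcases hcase with ⟨_, rfl⟩ | ⟨rfl, _⟩
                · exact hq'ne
                · simp
              have hlast1 : q2.getLast hq2e = q'.getLast hq'ne := by
                rcases hcase2 with ⟨_, h2⟩ | ⟨h2, _⟩
                · subst h2; rfl
                · subst h2; exact (List.getLast_cons hq2e).symm
              have hlast2 : q'.getLast hq'ne = q.getLast hqne := by
                rcases hcase with ⟨_, h2⟩ | ⟨h2, _⟩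
                · subst h2; rfl
                · subst h2; exact (List.getLast_cons hq'ne).symm
              obtain ⟨a0, b0, hlast0, hab0, hb0w⟩ := hcert hqne
              have hzle : z ≤ q.getLast hqne := by
                have := pv_le_getLast q2 hq2 hq2e z hz
                rw [hlast1, hlast2] at this
                exact this
              by_cases hzk : b0 ≤ q.getLast hqne
              · -- every pool element is ≥ b0, hence a,b ≥ b0 and the mix grew
                have hall : ∀ w ∈ base ++ q, b0 ≤ w := by
                  intro w hw
                  rcases List.mem_append.mp hw with hwb | hwq
                  · exact hb0w w (List.mem_append_left _ hwb)
                  · rw [← List.dropLast_append_getLast hqne] at hwq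
                    rcases List.mem_append.mp hwq with hwd | hwl
                    · exact hb0w w (List.mem_append_right _ hwd)
                    · rw [List.mem_singleton] at hwl
                      subst hwl
                      exact hzk
                have h1 : b0 ≤ a := hall a hmem
                have h2 : b0 ≤ b := hall b hbPool
                rw [hlast0] at hzle
                omega
              · -- q.getLast < b0: then q = [zk] and both pops came from base, so q2 = q = [zk];
                -- but then a ∈ base is ≥ b0 and ≤ zk < b0, a contradiction
                exfalso
                match q, hqne with
                | [y], _ =>
                  -- q = [y]; q2 ≠ [] forces q' = [y] and q2 = [y], so a came from base
                  have hq'y : q' = [y] := by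
                    rcases hcase with ⟨_, h2⟩ | ⟨h2, _⟩
                    · exact h2
                    · exfalso
                      have : q' = [] := by
                        have := congrArg List.tail h2
                        simpa using this.symm
                      exact hq'ne this
                  have habase : base = a :: base' := by
                    rcases hcase with ⟨h1, _⟩ | ⟨h2, _⟩
                    · exact h1
                    · exfalso
                      rw [hq'y] at h2
                      simp at h2
                  have hamem : a ∈ base ++ ([y] : List Int).dropLast := by
                    rw [habase]; simp
                  have h1 := hb0w a hamem
                  have h2 : a ≤ ([y] : List Int).getLast (by simp) := by
                    apply hmin
                    simp [List.getLast]
                  simp [List.getLast] at h2 hzk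
                  omega
                | y :: z :: t, _ =>
                  -- q has ≥ 2 elements: its head lies in dropLast, so b0 ≤ y ≤ getLast < b0
                  have h1 : b0 ≤ y := by
                    apply hb0w
                    apply List.mem_append_right
                    simp [List.dropLast]
                  have h2 : y ≤ (y :: z :: t).getLast (by simp) :=
                    pv_le_getLast _ hq (by simp) y List.mem_cons_self
                  omega
          have hq2full : (q2 ++ [a + 2 * b]).Pairwise (· ≤ ·) := by
            rw [List.pairwise_append]
            refine ⟨hq2, List.pairwise_singleton _ _, ?_⟩
            intro x hx y hy
            rw [List.mem_singleton] at hy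
            subst hy
            exact hpushle x hx
          have hcertNew : pvQCert base2 (q2 ++ [a + 2 * b]) := by
            intro h
            refine ⟨a, b, ?_, hab, ?_⟩
            · rw [List.getLast_append_singleton]
            · intro w hw
              rw [List.dropLast_concat] at hw
              exact hmin2 w (List.mem_of_mem_erase (hperm2'.mem_iff.mp hw))
          have hperm3 : (base2 ++ (q2 ++ [a + 2 * b])).Perm ((a + b * 2) :: (l.erase a).erase b) := by
            have h1 : (base2 ++ q2).Perm ((l.erase a).erase b) := hperm2'.trans (hperm2.erase b)
            have hx : a + 2 * b = a + b * 2 := by ring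
            calc (base2 ++ (q2 ++ [a + 2 * b])).Perm ((base2 ++ q2) ++ [a + 2 * b]) := by
                  rw [List.append_assoc]
              _ |>.Perm (((l.erase a).erase b) ++ [a + 2 * b]) := h1.append_right _
              _ |>.Perm ((a + 2 * b) :: (l.erase a).erase b) := List.perm_append_singleton _ _
              _ = ((a + b * 2) :: (l.erase a).erase b) := by rw [hx]
          exact ih _ _ _ _ hperm3 hb2 hq2full hcertNew

-- ===== VERDICT (by name: the statement is the Claim_ definition above) =====
theorem solution_spec : Claim_equal_solution := by
  intro sco K _ _
  unfold Spec_solution solution solution_alt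
  apply pv_loop_eq
  · simpa using (PySem.List.sorted_perm sco (fun x => x) false)
  · exact PySem.List.sorted_pairwise sco (fun x => x)
  · exact List.Pairwise.nil
  · intro h
    exact absurd rfl h
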